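-- pv_equiv track=rewrite | github.com/EdsonEddy/scsc | notebooks/datasets/large/766204.py | encontrar_num
-- ===== SOURCE A (Python) =====
-- def encontrar_num(posicion):
--     n, sum, ant = 0, 0, 0
--     for i in range(posicion):
--         c = 2*i + 1
--         for j in range(c):
--             n += 1
--             sum = sum + n
--         p = sum - ant
--         sum = 0
--         anterior = ant
--         ant = p
--     return f"{anterior}+{p}"
-- ===== SOURCE B (Python) =====
-- def encontrar_num(posicion):
--     # O(posicion): the inner loop of A sums a block of 2*i+1 consecutive
--     # integers starting after i*i; replace it with the arithmetic-series
--     # closed form and keep only the (prev, cur) recurrence.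
--     prev, cur = 0, 0
--     for i in range(posicion):
--         bloque = (2 * i + 1) * (i * i) + (2 * i + 1) * (i + 1)
--         prev, cur = cur, bloque - cur
--     return f"{prev}+{cur}"
-- ===== Notes on version B (the rewrite author's own statement) =====
-- stated objective: faster
-- what changed: The inner loop that sums each block of 2*i+1 consecutive integers is replaced by the arithmetic-series closed form, leaving a single O(posicion) loop over the (prev, cur) recurrence.
-- outside the precondition, e.g. on encontrar_num(0): A raises UnboundLocalError, B returns '0+0'
import Mathlib
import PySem

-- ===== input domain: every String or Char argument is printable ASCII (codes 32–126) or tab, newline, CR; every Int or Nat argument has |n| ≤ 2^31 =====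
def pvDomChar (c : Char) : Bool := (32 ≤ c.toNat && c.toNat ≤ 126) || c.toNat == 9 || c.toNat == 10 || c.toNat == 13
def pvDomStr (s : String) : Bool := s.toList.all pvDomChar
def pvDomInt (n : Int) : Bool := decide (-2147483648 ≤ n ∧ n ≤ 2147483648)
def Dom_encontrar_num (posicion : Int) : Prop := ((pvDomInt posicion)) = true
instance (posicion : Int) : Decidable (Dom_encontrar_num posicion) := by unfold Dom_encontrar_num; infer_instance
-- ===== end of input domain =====

-- B replaces A's inner block-summing loop by the arithmetic-series closed form (O(posicion) instead of O(posicion^2)).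

-- ===== PORT A =====
-- state: (n, sum, ant, anterior, p); 'anterior'/'p' are unbound in Python until the
-- first iteration (Pre_ requires posicion ≥ 1), modelled here with initial value 0.
def pvInnerA (ns : Int × Int) (_j : Int) : Int × Int :=
  (ns.1 + 1, ns.2 + (ns.1 + 1))

def pvOuterA (st : Int × Int × Int × Int × Int) (i : Int) : Int × Int × Int × Int × Int :=
  let c := 2 * i + 1
  let ns := (PySem.List.pyRange 0 c 1).foldl pvInnerA (st.1, st.2.1)
  let p := ns.2 - st.2.2.1
  (ns.1, 0, p, st.2.2.1, p)

def encontrar_num (posicion : Int) : String :=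
  let s := (PySem.List.pyRange 0 posicion 1).foldl pvOuterA (0, 0, 0, 0, 0)
  PySem.Int.toStr s.2.2.2.1 ++ "+" ++ PySem.Int.toStr s.2.2.2.2

-- ===== PORT B =====
def pvStepB (pc : Int × Int) (i : Int) : Int × Int :=
  let bloque := (2 * i + 1) * (i * i) + (2 * i + 1) * (i + 1)
  (pc.2, bloque - pc.2)

def encontrar_num_alt (posicion : Int) : String :=
  let s := (PySem.List.pyRange 0 posicion 1).foldl pvStepB (0, 0)
  PySem.Int.toStr s.1 ++ "+" ++ PySem.Int.toStr s.2

-- ===== PRECONDITION & SPEC =====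
-- Pre_ excludes posicion ≤ 0, on which Python A raises UnboundLocalError ('anterior'/'p' never assigned).
def Pre_encontrar_num (posicion : Int) : Prop := 1 ≤ posicion
instance (posicion : Int) : Decidable (Pre_encontrar_num posicion) := by unfold Pre_encontrar_num; infer_instance
def pvWitness_encontrar_num : Int := 3

def Spec_encontrar_num (posicion : Int) (out : String) : Prop := out = encontrar_num_alt posicion
instance (posicion : Int) (out : String) : Decidable (Spec_encontrar_num posicion out) := by unfold Spec_encontrar_num; infer_instance

-- ===== CLAIM (what is proved, stated in full; the proofs are below) =====
def Claim_equal_encontrar_num : Prop := ∀ (posicion : Int), Dom_encontrar_num posicion → Pre_encontrar_num posicion → Spec_encontrar_num posicion (encontrar_num posicion)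

-- ===== LEMMAS AND PROOFS =====

/-- Triangular numbers: tri k = 1 + 2 + ⋯ + k. -/
def pvTri : Nat → Int
  | 0 => 0
  | k + 1 => pvTri k + (k + 1)

theorem pvInner_eq (l : List Int) (n s : Int) :
    l.foldl pvInnerA (n, s) = (n + l.length, s + l.length * n + pvTri l.length) := by
  induction l generalizing n s with
  | nil => simp [pvTri]
  | cons x t ih =>
    simp only [List.foldl_cons, pvInnerA, ih, List.length_cons]
    refine Prod.ext ?_ ?_ <;> simp [pvTri] <;> try (push_cast; ring)

theorem pvTri_odd (m : Nat) : pvTri (2 * m + 1) = (2 * (m : Int) + 1) * (m + 1) := by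
  induction m with
  | zero => decide
  | succ m ih =>
    have h : 2 * (m + 1) + 1 = (2 * m + 1) + 1 + 1 := by omega
    rw [h]
    show pvTri (2 * m + 1) + _ + _ = _
    rw [ih]; push_cast; ring

theorem pvOuter_lemma (st : Int × Int × Int × Int × Int) (m : Nat) :
    pvOuterA st (m : Int) =
      (st.1 + (2 * m + 1), 0,
       st.2.1 + (2 * m + 1) * st.1 + (2 * (m : Int) + 1) * (m + 1) - st.2.2.1,
       st.2.2.1,
       st.2.1 + (2 * m + 1) * st.1 + (2 * (m : Int) + 1) * (m + 1) - st.2.2.1) := by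
  simp only [pvOuterA]
  rw [pvInner_eq]
  have hlen : (PySem.List.pyRange 0 (2 * (m : Int) + 1) 1).length = 2 * m + 1 := by
    rw [PySem.List.length_pyRange_one]; omega
  rw [hlen, pvTri_odd]
  refine Prod.ext ?_ (Prod.ext ?_ (Prod.ext ?_ (Prod.ext ?_ ?_))) <;> simp <;> try (push_cast; ring)

theorem pvStep_lemma (pc : Int × Int) (i : Int) :
    pvStepB pc i = (pc.2, (2 * i + 1) * (i * i) + (2 * i + 1) * (i + 1) - pc.2) := rfl

theorem pvMain (m : Nat) :
    (PySem.List.pyRange 0 (m : Int) 1).foldl pvOuterA (0, 0, 0, 0, 0) =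
      (((m : Int) * m, 0,
        ((PySem.List.pyRange 0 (m : Int) 1).foldl pvStepB (0, 0)).2,
        ((PySem.List.pyRange 0 (m : Int) 1).foldl pvStepB (0, 0)).1,
        ((PySem.List.pyRange 0 (m : Int) 1).foldl pvStepB (0, 0)).2)) := by
  induction m with
  | zero => simp [PySem.List.pyRange_one_eq_nil]
  | succ m ih =>
    have hsplit : PySem.List.pyRange 0 ((m : Int) + 1) 1 =
        PySem.List.pyRange 0 (m : Int) 1 ++ [(m : Int)] :=
      PySem.List.pyRange_one_succ_right (by positivity)
    have hm1 : ((m + 1 : Nat) : Int) = (m : Int) + 1 := by push_cast; ring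
    rw [hm1, hsplit, List.foldl_append, List.foldl_append, ih]
    simp only [List.foldl_cons, List.foldl_nil]
    -- compute one step of each side
    rw [pvStep_lemma, pvOuter_lemma]
    push_cast
    refine Prod.ext ?_ (Prod.ext ?_ (Prod.ext ?_ (Prod.ext ?_ ?_))) <;> simp <;> try ring
  
-- ===== VERDICT (by name: the statement is the Claim_ definition above) =====
theorem encontrar_num_spec : Claim_equal_encontrar_num := by
  intro posicion _ hpre
  unfold Spec_encontrar_num encontrar_num encontrar_num_alt
  unfold Pre_encontrar_num at hpre
  have h : posicion = ((posicion.toNat : Nat) : Int) := by omega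
  rw [h, pvMain]
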